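-- pv_equiv track=rewrite | github.com/TurkuNLP/ocr-postcorrection-lm | alignment-and-gridsearch/alignment/utils.py | mapping_format
-- ===== SOURCE A (Python) =====
-- def mapping_format(input_text):
--     spaces = []
--     new_lines = []
--     words = []
--     dashes = []
--
--     for index, char in enumerate(input_text):
--         if char==" ":
--             spaces.append(index)
--         elif char=="\n":
--             new_lines.append(index)
--         elif char=="-":
--             dashes.append(index)
--         else:
--             words.append(index)
--
--     map = {
--         "spaces": spaces,
--         "new_lines": new_lines,
--         "words": words,
--         "dashes": dashes
--     }
--
--     return map
-- ===== SOURCE B (Python) =====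
-- def mapping_format(input_text):
--     def positions(ch):
--         out = []
--         i = input_text.find(ch)
--         while i != -1:
--             out.append(i)
--             i = input_text.find(ch, i + 1)
--         return out
--
--     spaces = positions(" ")
--     new_lines = positions("\n")
--     dashes = positions("-")
--     marked = set(spaces + new_lines + dashes)
--     words = [i for i in range(len(input_text)) if i not in marked]
--     return {
--         "spaces": spaces,
--         "new_lines": new_lines,
--         "words": words,
--         "dashes": dashes,
--     }
-- ===== Notes on version B (the rewrite author's own statement) =====
-- stated objective: alternative
-- what changed: Instead of one Python-level loop classifying every character into four lists, B finds each delimiter's positions by repeated str.find scans (C-level substring search) and computes word indices as the set-complement of the delimiter indices over range(len).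
import Mathlib
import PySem

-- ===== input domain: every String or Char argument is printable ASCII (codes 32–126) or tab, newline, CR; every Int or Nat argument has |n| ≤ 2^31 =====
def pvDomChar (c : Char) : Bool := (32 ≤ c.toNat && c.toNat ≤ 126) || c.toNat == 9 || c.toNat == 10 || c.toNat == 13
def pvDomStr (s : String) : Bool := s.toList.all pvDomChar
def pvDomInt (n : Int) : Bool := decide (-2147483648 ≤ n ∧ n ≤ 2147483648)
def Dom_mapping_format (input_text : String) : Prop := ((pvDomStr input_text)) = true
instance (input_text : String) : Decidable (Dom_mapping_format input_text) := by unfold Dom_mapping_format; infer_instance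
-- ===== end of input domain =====

-- B replaces A's single four-way classifying loop by repeated str.find scans (one per delimiter
-- character) plus a set-complement pass over range(len) for the word indices (same O(n) cost, different traversal).

-- ===== PORT A =====
-- one pass with four accumulators, branches in A's order
def mapping_format (input_text : String) : List (String × List Int) :=
  let st := (PySem.List.enumerate input_text.toList).foldl
    (fun (acc : List Int × List Int × List Int × List Int) p =>
      if p.2 = ' ' then (acc.1 ++ [p.1], acc.2.1, acc.2.2.1, acc.2.2.2)
      else if p.2 = '\n' then (acc.1, acc.2.1 ++ [p.1], acc.2.2.1, acc.2.2.2)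
      else if p.2 = '-' then (acc.1, acc.2.1, acc.2.2.1, acc.2.2.2 ++ [p.1])
      else (acc.1, acc.2.1, acc.2.2.1 ++ [p.1], acc.2.2.2))
    ([], [], [], [])
  [("spaces", st.1), ("new_lines", st.2.1), ("words", st.2.2.1), ("dashes", st.2.2.2)]

-- ===== PORT B =====
-- Source B's 'while i != -1' find loop; the fuel argument (length+1, enough since each find
-- result is strictly larger than the previous start) only makes the recursion structural
def altLoop (l : List Char) (ch : List Char) : Nat → Int → List Int
  | 0, _ => []
  | fuel + 1, i =>
    if i = -1 then []
    else i :: altLoop l ch fuel (PySem.Chars.findFrom l ch (i + 1) none)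

-- Source B's positions(ch): first find, then the loop
def altPositions (l : List Char) (ch : List Char) : List Int :=
  altLoop l ch (l.length + 1) (PySem.Chars.find l ch)

def mapping_format_alt (input_text : String) : List (String × List Int) :=
  let l := input_text.toList
  let spaces := altPositions l [' ']
  let new_lines := altPositions l ['\n']
  let dashes := altPositions l ['-']
  let marked := PySem.Set.ofList (spaces ++ new_lines ++ dashes)
  let words := (PySem.List.pyRange 0 l.length 1).filter (fun i => ¬ marked.contains i)
  [("spaces", spaces), ("new_lines", new_lines), ("words", words), ("dashes", dashes)]

-- ===== PRECONDITION & SPEC =====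
def Spec_mapping_format (input_text : String) (out : List (String × List Int)) : Prop := out = mapping_format_alt input_text
instance (input_text : String) (out : List (String × List Int)) : Decidable (Spec_mapping_format input_text out) := by unfold Spec_mapping_format; infer_instance

-- ===== CLAIM (what is proved, stated in full; the proofs are below) =====
def Claim_equal_mapping_format : Prop := ∀ (input_text : String), Dom_mapping_format input_text → Spec_mapping_format input_text (mapping_format input_text)

-- ===== LEMMAS AND PROOFS =====

-- the indices of the occurrences of c in l at positions ≥ k, in increasing order
def pvMatchesFrom (l : List Char) (c : Char) (k : Nat) : List Int :=
  ((PySem.List.enumerate l).filter (fun p => decide ((k : Int) ≤ p.1) && decide (p.2 = c))).map (·.1)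

theorem pv_infix_singleton (c : Char) (xs : List Char) : [c] <:+: xs ↔ c ∈ xs := by
  constructor
  · rintro ⟨s, t, rfl⟩; simp
  · intro h; obtain ⟨s, t, rfl⟩ := List.append_of_mem h; exact ⟨s, t, by simp⟩

theorem pv_prefix_singleton (c : Char) (xs : List Char) : [c] <+: xs ↔ xs.head? = some c := by
  cases xs with
  | nil => simp
  | cons a t => simp [List.cons_prefix_cons, eq_comm]

theorem pv_mem_matchesFrom (l : List Char) (c : Char) (k : Nat) (x : Int) :
    x ∈ pvMatchesFrom l c k ↔ ∃ j : Nat, x = (j : Int) ∧ k ≤ j ∧ ∃ h : j < l.length, l[j] = c := by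
  unfold pvMatchesFrom
  simp only [List.mem_map, List.mem_filter]
  constructor
  · rintro ⟨p, ⟨hp, hcond⟩, rfl⟩
    rw [PySem.List.mem_enumerate_iff] at hp
    obtain ⟨j, hj, rfl⟩ := hp
    simp only [Bool.and_eq_true, decide_eq_true_eq] at hcond
    refine ⟨j, by simp, ?_, hj, hcond.2⟩
    have := hcond.1; simp at this; exact_mod_cast this
  · rintro ⟨j, rfl, hk, hj, hc⟩
    refine ⟨((j : Int), l[j]), ⟨?_, ?_⟩, rfl⟩
    · rw [PySem.List.mem_enumerate_iff]; exact ⟨j, hj, by simp⟩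
    · simp only [Bool.and_eq_true, decide_eq_true_eq]; exact ⟨by exact_mod_cast hk, hc⟩

theorem pv_pairwise_matchesFrom (l : List Char) (c : Char) (k : Nat) :
    (pvMatchesFrom l c k).Pairwise (· < ·) := by
  unfold pvMatchesFrom
  exact (List.Pairwise.filter _ (PySem.List.pairwise_lt_enumerate l 0)).map _ (fun a b h => h)

theorem pv_matchesFrom_nil (l : List Char) (c : Char) (k : Nat)
    (h : ∀ j : Nat, k ≤ j → ∀ hj : j < l.length, l[j] ≠ c) :
    pvMatchesFrom l c k = [] := by
  rw [List.eq_nil_iff_forall_not_mem]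
  intro x hx
  rw [pv_mem_matchesFrom] at hx
  obtain ⟨j, _, hk, hj, hc⟩ := hx
  exact h j hk hj hc

theorem pv_matchesFrom_cons (l : List Char) (c : Char) (k m : Nat)
    (hkm : k ≤ m) (hm : m < l.length) (hc : l[m] = c)
    (hmin : ∀ p : Nat, k ≤ p → p < m → ∀ hp : p < l.length, l[p] ≠ c) :
    pvMatchesFrom l c k = (m : Int) :: pvMatchesFrom l c (m + 1) := by
  have hpw1 : (pvMatchesFrom l c k).Pairwise (· < ·) := pv_pairwise_matchesFrom l c k
  have hpw2 : ((m : Int) :: pvMatchesFrom l c (m + 1)).Pairwise (· < ·) := by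
    refine List.pairwise_cons.mpr ⟨?_, pv_pairwise_matchesFrom l c (m + 1)⟩
    intro x hx
    rw [pv_mem_matchesFrom] at hx
    obtain ⟨j, rfl, hk, _, _⟩ := hx
    exact_mod_cast Nat.lt_of_lt_of_le (Nat.lt_succ_self m) hk
  have hmem : ∀ x, x ∈ pvMatchesFrom l c k ↔ x ∈ (m : Int) :: pvMatchesFrom l c (m + 1) := by
    intro x
    rw [pv_mem_matchesFrom, List.mem_cons, pv_mem_matchesFrom]
    constructor
    · rintro ⟨j, rfl, hk, hj, hjc⟩
      rcases Nat.lt_or_ge j m with hlt | hge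
      · exact absurd hjc (hmin j hk hlt hj)
      · rcases Nat.eq_or_lt_of_le hge with rfl | hgt
        · exact Or.inl rfl
        · exact Or.inr ⟨j, rfl, hgt, hj, hjc⟩
    · rintro (rfl | ⟨j, rfl, hk, hj, hjc⟩)
      · exact ⟨m, rfl, hkm, hm, hc⟩
      · exact ⟨j, rfl, Nat.le_trans hkm (Nat.le_of_succ_le hk), hj, hjc⟩
  have hperm := (List.perm_ext_iff_of_nodup (hpw1.imp ne_of_lt) (hpw2.imp ne_of_lt)).mpr hmem
  exact hperm.eq_of_pairwise (fun a b _ _ h1 h2 => absurd h1 (lt_asymm h2)) hpw1 hpw2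

theorem pv_altLoop_spec (l : List Char) (c : Char) :
    ∀ (fuel k : Nat), k ≤ l.length → l.length - k < fuel →
      altLoop l [c] fuel (PySem.Chars.findFrom l [c] (k : Int) none) = pvMatchesFrom l c k := by
  intro fuel
  induction fuel with
  | zero => intro k _ h; omega
  | succ fuel ih =>
    intro k hk hfuel
    rw [PySem.Chars.findFrom_natCast l [c] k hk]
    by_cases hj : PySem.Chars.find (l.drop k) [c] = -1
    · simp only [hj, if_true, altLoop]
      rw [pv_matchesFrom_nil]
      intro j hkj hjl hc
      have hni : ¬ [c] <:+: l.drop k := (PySem.Chars.find_eq_neg_one_iff _ _).mp hj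
      rw [pv_infix_singleton] at hni
      apply hni
      have : (l.drop k)[j - k]'(by simp; omega) = c := by
        rw [List.getElem_drop]
        have : k + (j - k) = j := by omega
        simp_rw [this]; exact hc
      exact this ▸ List.getElem_mem _
    · have h0 : 0 ≤ PySem.Chars.find (l.drop k) [c] := by
        have := PySem.Chars.neg_one_le_find (l.drop k) [c]
        omega
      have hspec := PySem.Chars.find_spec h0
      set j : Int := PySem.Chars.find (l.drop k) [c] with hjdef
      set jN : Nat := j.toNat with hjN
      have hjcast : (jN : Int) = j := Int.toNat_of_nonneg h0
      set m : Nat := k + jN with hm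
      have hpre : [c] <+: l.drop m := by
        have := hspec.1
        rwa [List.drop_drop, ← hm] at this
      rw [pv_prefix_singleton, List.head?_drop] at hpre
      have hmlen : m < l.length := by
        by_contra h
        rw [List.getElem?_eq_none (by omega)] at hpre
        simp at hpre
      have hmc : l[m] = c := by
        rw [List.getElem?_eq_getElem hmlen] at hpre
        exact Option.some.inj hpre
      have hmin : ∀ p : Nat, k ≤ p → p < m → ∀ hp : p < l.length, l[p] ≠ c := by
        intro p hkp hpm hpl hc
        have hlt : p - k < jN := by omega
        have := hspec.2 (p - k) hlt
        apply this
        rw [List.drop_drop]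
        have : k + (p - k) = p := by omega
        rw [this, pv_prefix_singleton, List.head?_drop, List.getElem?_eq_getElem hpl, hc]
      simp only [if_neg hj, altLoop]
      have hne : ¬ ((k : Int) + j = -1) := by omega
      rw [if_neg hne]
      have harg : (k : Int) + j + 1 = ((m + 1 : Nat) : Int) := by
        omega
      rw [harg, ih (m + 1) (by omega) (by omega),
        pv_matchesFrom_cons l c k m (by omega) hmlen hmc hmin]
      congr 1
      omega

theorem pv_altPositions_spec (l : List Char) (c : Char) :
    altPositions l [c] = pvMatchesFrom l c 0 := by
  unfold altPositions
  have h := pv_altLoop_spec l c (l.length + 1) 0 (Nat.zero_le _) (by omega)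
  rw [← PySem.Chars.findFrom_zero l [c]]
  simpa using h

theorem pv_matchesFrom_zero (l : List Char) (c : Char) :
    pvMatchesFrom l c 0 = ((PySem.List.enumerate l).filter (fun p => p.2 = c)).map (·.1) := by
  unfold pvMatchesFrom
  congr 1
  apply List.filter_congr
  intro p hp
  rw [PySem.List.mem_enumerate_iff] at hp
  obtain ⟨k, hk, rfl⟩ := hp
  simp

theorem pv_mem_pos (l : List Char) (c : Char) (j : Nat) (hj : j < l.length) :
    ((j : Int) ∈ pvMatchesFrom l c 0) ↔ l[j] = c := by
  rw [pv_mem_matchesFrom]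
  constructor
  · rintro ⟨j', hj', -, hj'l, hc⟩
    have : j = j' := by exact_mod_cast hj'
    subst this; exact hc
  · intro hc; exact ⟨j, rfl, Nat.zero_le _, hj, hc⟩

theorem pv_words_eq (l : List Char) :
    (PySem.List.pyRange 0 l.length 1).filter
        (fun i => ¬ (PySem.Set.ofList (pvMatchesFrom l ' ' 0 ++ pvMatchesFrom l '\n' 0 ++ pvMatchesFrom l '-' 0)).contains i)
      = ((PySem.List.enumerate l).filter (fun p => ¬ (p.2 = ' ' ∨ p.2 = '\n' ∨ p.2 = '-'))).map (·.1) := by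
  rw [PySem.List.enumerate_eq_map_pyRange (d := 'x'), List.filter_map, List.map_map]
  have : ((·.1) ∘ fun j => ((j : Int), PySem.List.pyGetD l j 'x')) = id := by
    funext j; rfl
  rw [this, List.map_id]
  apply List.filter_congr
  intro j hj
  rw [PySem.List.mem_pyRange_one] at hj
  have hjn : j = ((j.toNat : Nat) : Int) := (Int.toNat_of_nonneg hj.1).symm
  have hjl : j.toNat < l.length := by omega
  have hget : PySem.List.pyGetD l ((j.toNat : Nat) : Int) 'x' = l[j.toNat] := by
    rw [PySem.List.pyGetD_of_nonneg]
    · simp only [Int.toNat_natCast]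
      exact List.getD_eq_getElem _ _ hjl
    · positivity
  simp only [Function.comp_apply, decide_eq_decide]
  rw [PySem.Set.contains_eq_listContains]
  simp only [List.contains_iff_mem, PySem.Set.mem_ofList, List.mem_append]
  rw [hjn, pv_mem_pos l ' ' j.toNat hjl, pv_mem_pos l '\n' j.toNat hjl, pv_mem_pos l '-' j.toNat hjl]
  rw [hget]
  tauto

-- A's fold with four accumulators, state characterised as four filters
theorem mapping_format_fold_eq (l : List (Int × Char)) (a b c d : List Int) :
    l.foldl
      (fun (acc : List Int × List Int × List Int × List Int) p =>
        if p.2 = ' ' then (acc.1 ++ [p.1], acc.2.1, acc.2.2.1, acc.2.2.2)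
        else if p.2 = '\n' then (acc.1, acc.2.1 ++ [p.1], acc.2.2.1, acc.2.2.2)
        else if p.2 = '-' then (acc.1, acc.2.1, acc.2.2.1, acc.2.2.2 ++ [p.1])
        else (acc.1, acc.2.1, acc.2.2.1 ++ [p.1], acc.2.2.2))
      (a, b, c, d)
    = (a ++ (l.filter (fun p => p.2 = ' ')).map (·.1),
       b ++ (l.filter (fun p => p.2 = '\n')).map (·.1),
       c ++ (l.filter (fun p => ¬ (p.2 = ' ' ∨ p.2 = '\n' ∨ p.2 = '-'))).map (·.1),
       d ++ (l.filter (fun p => p.2 = '-')).map (·.1)) := by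
  induction l generalizing a b c d with
  | nil => simp
  | cons x xs ih =>
    simp only [List.foldl_cons]
    by_cases h1 : x.2 = ' '
    · simp [h1, ih]
    · by_cases h2 : x.2 = '\n'
      · simp [h2, ih]
      · by_cases h3 : x.2 = '-'
        · simp [h3, ih]
        · simp [h1, h2, h3, ih]

-- ===== VERDICT (by name: the statement is the Claim_ definition above) =====
theorem mapping_format_spec : Claim_equal_mapping_format := by
  intro s _
  unfold Spec_mapping_format mapping_format mapping_format_alt
  simp only [mapping_format_fold_eq, pv_altPositions_spec, List.nil_append]
  rw [pv_words_eq]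
  simp only [pv_matchesFrom_zero]
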